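-- pv_equiv track=rewrite | github.com/ProcyonDynamic/NAVSYS_MINI | modules/portalis_mini/file_lifecycle_service.py | _find_existing_instance_document_id
-- ===== SOURCE A (Python) =====
-- from typing import Any, Dict, List
--
-- def _find_existing_instance_document_id(store: Dict[str, Any], physical_id: str, workspace_id: str) -> str:
--     preferred = ""
--     fallback = ""
--     for document_id, entry in store.get("document_instances", {}).items():
--         instance = dict(entry or {})
--         if instance.get("file_id") != physical_id:
--             continue
--         if workspace_id and instance.get("workspace_id") == workspace_id:
--             preferred = document_id
--             break
--         if not fallback:
--             fallback = document_id
--     return preferred or fallback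
-- ===== SOURCE B (Python) =====
-- def _find_existing_instance_document_id(store, physical_id, workspace_id):
--     # Scan back-to-front with unconditional overriding assignments: after the loop,
--     # `preferred` holds the FIRST (leftmost) workspace match and `fallback` the first
--     # other file match, so no break and no "only set once" guard is needed.
--     preferred = ""
--     fallback = ""
--     for document_id, entry in reversed(list(store.get("document_instances", {}).items())):
--         instance = dict(entry or {})
--         if instance.get("file_id") == physical_id:
--             if workspace_id and instance.get("workspace_id") == workspace_id:
--                 preferred = document_id
--             else:
--                 fallback = document_id
--     return preferred or fallback
-- ===== Notes on version B (the rewrite author's own statement) =====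
-- stated objective: alternative
-- what changed: Replaces A's forward scan with break and guarded write-once preferred/fallback accumulators by a reverse (back-to-front) traversal with unconditional overriding assignments and no early exit, so the leftmost matches survive by overriding.
import Mathlib
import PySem

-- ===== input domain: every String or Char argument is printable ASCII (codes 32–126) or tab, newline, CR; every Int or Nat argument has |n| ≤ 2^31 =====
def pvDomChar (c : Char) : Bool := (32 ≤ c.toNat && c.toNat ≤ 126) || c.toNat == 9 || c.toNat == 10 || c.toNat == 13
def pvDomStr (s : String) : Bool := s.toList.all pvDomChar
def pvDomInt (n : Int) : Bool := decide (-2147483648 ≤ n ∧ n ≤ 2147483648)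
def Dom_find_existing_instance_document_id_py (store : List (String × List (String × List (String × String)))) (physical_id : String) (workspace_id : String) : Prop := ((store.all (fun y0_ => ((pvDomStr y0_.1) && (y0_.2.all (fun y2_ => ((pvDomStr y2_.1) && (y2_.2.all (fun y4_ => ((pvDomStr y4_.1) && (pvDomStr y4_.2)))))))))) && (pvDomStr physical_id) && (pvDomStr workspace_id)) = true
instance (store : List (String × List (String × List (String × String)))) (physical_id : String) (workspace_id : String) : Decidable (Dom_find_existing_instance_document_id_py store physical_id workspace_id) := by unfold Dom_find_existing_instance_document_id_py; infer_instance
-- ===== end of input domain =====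

-- B replaces A's forward loop (break + write-once preferred/fallback guards) by a reverse,
-- back-to-front traversal with unconditional overriding assignments and no early exit;
-- objective: alternative (same cost, different accumulation strategy).

-- ===== PORT A =====
-- A's for-loop: carries the `fallback` accumulator; on `break` it returns `preferred or fallback` directly
def findLoopA (physical_id workspace_id : String) : List (String × List (String × String)) → String → String
  | [], fallback => fallback  -- loop ends with preferred == "", so `preferred or fallback` = fallback
  | (document_id, entry) :: rest, fallback =>
    let instance_ := PySem.Dict.ofList entry   -- dict(entry or {}): `entry or {}` is the identity on this type
    if instance_.get? "file_id" ≠ some physical_id then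
      findLoopA physical_id workspace_id rest fallback
    else if workspace_id ≠ "" ∧ instance_.get? "workspace_id" = some workspace_id then
      -- preferred = document_id; break; return preferred or fallback
      (if document_id ≠ "" then document_id else fallback)
    else
      findLoopA physical_id workspace_id rest (if fallback = "" then document_id else fallback)

def find_existing_instance_document_id_py (store : List (String × List (String × List (String × String)))) (physical_id : String) (workspace_id : String) : String :=
  findLoopA physical_id workspace_id
    (PySem.Dict.ofList ((PySem.Dict.ofList store).getD "document_instances" [])).items ""

-- ===== PORT B =====
-- B's reversed for-loop: a fold over the reversed item list, state = (preferred, fallback),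
-- each match overwrites its slot unconditionally
def bStep (physical_id workspace_id : String) (pf : String × String) (p : String × List (String × String)) : String × String :=
  let instance_ := PySem.Dict.ofList p.2
  if instance_.get? "file_id" = some physical_id then
    if workspace_id ≠ "" ∧ instance_.get? "workspace_id" = some workspace_id then
      (p.1, pf.2)
    else (pf.1, p.1)
  else pf

def find_existing_instance_document_id_py_alt (store : List (String × List (String × List (String × String)))) (physical_id : String) (workspace_id : String) : String :=
  let items := (PySem.Dict.ofList ((PySem.Dict.ofList store).getD "document_instances" [])).items
  let pf := items.reverse.foldl (bStep physical_id workspace_id) ("", "")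
  if pf.1 ≠ "" then pf.1 else pf.2

-- ===== PRECONDITION & SPEC =====
-- Pre_ excludes stores whose document_instances mapping uses the empty string as a document id:
-- there A's truthiness-based preferred/fallback tests treat the empty id as "no result" while B
-- treats it as an ordinary id — a defensible-corner tie on a degenerate key.
def Pre_find_existing_instance_document_id_py (store : List (String × List (String × List (String × String)))) (physical_id : String) (workspace_id : String) : Prop :=
  "" ∉ ((PySem.Dict.ofList store).getD "document_instances" []).map Prod.fst
instance (store : List (String × List (String × List (String × String)))) (physical_id : String) (workspace_id : String) : Decidable (Pre_find_existing_instance_document_id_py store physical_id workspace_id) := by unfold Pre_find_existing_instance_document_id_py; infer_instance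

def pvWitness_find_existing_instance_document_id_py : (List (String × List (String × List (String × String)))) × String × String :=
  ([("document_instances", [("d1", [("file_id", "f")]), ("d2", [("file_id", "f"), ("workspace_id", "w")])])], "f", "w")

def Spec_find_existing_instance_document_id_py (store : List (String × List (String × List (String × String)))) (physical_id : String) (workspace_id : String) (out : String) : Prop := out = find_existing_instance_document_id_py_alt store physical_id workspace_id
instance (store : List (String × List (String × List (String × String)))) (physical_id : String) (workspace_id : String) (out : String) : Decidable (Spec_find_existing_instance_document_id_py store physical_id workspace_id out) := by unfold Spec_find_existing_instance_document_id_py; infer_instance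

-- ===== CLAIM (what is proved, stated in full; the proofs are below) =====
def Claim_equal_find_existing_instance_document_id_py : Prop := ∀ (store : List (String × List (String × List (String × String)))) (physical_id : String) (workspace_id : String), Dom_find_existing_instance_document_id_py store physical_id workspace_id → Pre_find_existing_instance_document_id_py store physical_id workspace_id → Spec_find_existing_instance_document_id_py store physical_id workspace_id (find_existing_instance_document_id_py store physical_id workspace_id)

-- ===== LEMMAS AND PROOFS =====

-- keys of dict(l) all occur as keys in l
theorem mem_keys_ofList_sub {l : List (String × List (String × String))}
    {p : String × List (String × String)} (h : p ∈ (PySem.Dict.ofList l).items) :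
    p.1 ∈ l.map Prod.fst := by
  have hk : p.1 ∈ (PySem.Dict.ofList l).keys := by
    simp only [PySem.Dict.keys]
    exact List.mem_map_of_mem h
  have he : (PySem.Dict.ofList l).keys = PySem.Set.update PySem.Dict.empty.keys (l.map Prod.fst) :=
    PySem.Dict.keys_foldl_insert_key l Prod.fst (fun _ x => x.2) PySem.Dict.empty
  rw [he] at hk
  rcases (PySem.Set.mem_update _ _ _).1 hk with h1 | h1
  · simp [PySem.Dict.keys_empty] at h1
  · exact h1

-- B's reverse fold satisfies the head-recursion F (hd :: tl) = bStep (F tl) hd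
theorem bFold_cons (physical_id workspace_id : String)
    (hd : String × List (String × String)) (tl : List (String × List (String × String))) :
    ((hd :: tl).reverse.foldl (bStep physical_id workspace_id) ("", "")) =
      bStep physical_id workspace_id
        (tl.reverse.foldl (bStep physical_id workspace_id) ("", "")) hd := by
  simp [List.foldl_append]

-- A's loop, with pending fallback fb, in terms of B's reverse fold (all ids nonempty)
theorem findLoopA_eq_bFold (physical_id workspace_id : String)
    (l : List (String × List (String × String))) (fb : String)
    (h : ∀ p ∈ l, p.1 ≠ "") :
    findLoopA physical_id workspace_id l fb =
      (let pf := l.reverse.foldl (bStep physical_id workspace_id) ("", "")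
       if pf.1 ≠ "" then pf.1 else if fb ≠ "" then fb else pf.2) := by
  induction l generalizing fb with
  | nil =>
    by_cases hfb : fb = "" <;> simp [findLoopA, hfb]
  | cons hd tl ih =>
    obtain ⟨did, entry⟩ := hd
    have hdid : did ≠ "" := h (did, entry) (by simp)
    have htl : ∀ p ∈ tl, p.1 ≠ "" := fun p hp => h p (List.mem_cons_of_mem _ hp)
    rw [bFold_cons]
    simp only [findLoopA, bStep]
    by_cases hfile : (PySem.Dict.ofList entry).get? "file_id" = some physical_id
    · simp only [hfile, ne_eq, not_true_eq_false, if_false, if_true]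
      by_cases hws : workspace_id ≠ "" ∧ (PySem.Dict.ofList entry).get? "workspace_id" = some workspace_id
      · rw [if_pos hws, if_pos hws]
        simp [hdid]
      · rw [if_neg hws, if_neg hws]
        rw [ih _ htl]
        by_cases hfb : fb = ""
        · simp [hfb, hdid]
        · simp [hfb]
    · rw [if_pos (by simpa using hfile), if_neg hfile, ih fb htl]

-- ===== VERDICT (by name: the statement is the Claim_ definition above) =====
theorem find_existing_instance_document_id_py_spec : Claim_equal_find_existing_instance_document_id_py := by
  intro store physical_id workspace_id _hdom hpre
  unfold Spec_find_existing_instance_document_id_py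
  unfold find_existing_instance_document_id_py find_existing_instance_document_id_py_alt
  have hkeys : ∀ p ∈ (PySem.Dict.ofList ((PySem.Dict.ofList store).getD "document_instances" [])).items, p.1 ≠ "" := by
    intro p hp hcon
    exact hpre (by rw [← hcon]; exact mem_keys_ofList_sub hp)
  rw [findLoopA_eq_bFold physical_id workspace_id _ "" hkeys]
  simp
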